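-- pv_equiv track=rewrite | github.com/GimYoungPhil/Cracking_Codes_with_Python | src/ch17/my/makerDict.py | makeDick
-- ===== SOURCE A (Python) =====
-- def makeDick(word):
--     word = word.upper()
--     dic = {}
--     list = []
--     counter = 0
--
--     for ch in word:
--         if ch in dic:
--             list.append(dic[ch])
--         else:
--             character = str(counter)
--             dic[ch] = character
--             list.append(character)
--             counter = counter + 1
--
--     return '.'.join(list)
-- ===== SOURCE B (Python) =====
-- def makeDick(word):
--     chars = list(word.upper())
--     return '.'.join(str(len(set(chars[:chars.index(ch)]))) for ch in chars)
-- ===== Notes on version B (the rewrite author's own statement) =====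
-- stated objective: alternative
-- what changed: B drops A's dict/counter state entirely: each character's code is recomputed directly as the number of distinct characters in the slice before its first occurrence (list.index + set on a prefix), trading A's O(n) incremental table for a stateless per-character closed form.
import Mathlib
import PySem

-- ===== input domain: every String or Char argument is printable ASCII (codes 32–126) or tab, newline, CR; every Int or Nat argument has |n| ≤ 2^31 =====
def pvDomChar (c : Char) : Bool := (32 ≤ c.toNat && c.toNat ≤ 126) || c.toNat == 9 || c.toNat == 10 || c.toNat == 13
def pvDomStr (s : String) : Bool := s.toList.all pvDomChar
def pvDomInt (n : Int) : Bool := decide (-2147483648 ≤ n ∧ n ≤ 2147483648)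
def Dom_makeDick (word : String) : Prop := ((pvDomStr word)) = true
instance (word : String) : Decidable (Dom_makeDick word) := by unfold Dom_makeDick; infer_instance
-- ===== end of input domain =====

-- B drops A's dict/counter loop state entirely: each character's code is recomputed
-- stateless as the number of distinct characters before its first occurrence; objective: alternative.

-- ===== PORT A =====
-- state = (dic, list, counter); one step of A's for-loop
def makeDickStep (s : PySem.Dict Char String × List String × Int) (ch : Char) :
    PySem.Dict Char String × List String × Int :=
  if s.1.contains ch then
    (s.1, s.2.1 ++ [s.1.getD ch ""], s.2.2)     -- dic[ch] cannot raise: guarded by 'ch in dic'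
  else
    (s.1.insert ch (PySem.Int.toStr s.2.2), s.2.1 ++ [PySem.Int.toStr s.2.2], s.2.2 + 1)

def makeDick (word : String) : String :=
  let w := PySem.Str.upper word
  let st := w.toList.foldl makeDickStep (PySem.Dict.empty, [], 0)
  PySem.Str.join "." st.2.1

-- ===== PORT B =====
def makeDick_alt (word : String) : String :=
  let chars := (PySem.Str.upper word).toList
  -- '.'.join(str(len(set(chars[:chars.index(ch)]))) for ch in chars)
  -- chars.index(ch) cannot raise (ch is drawn from chars), so .getD 0 is never used
  PySem.Str.join "." (chars.map (fun ch =>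
    PySem.Int.toStr (((PySem.Set.ofList (chars.take ((PySem.List.index? chars ch).getD 0))).length : Nat) : Int)))

-- ===== PRECONDITION & SPEC =====
def Spec_makeDick (word : String) (out : String) : Prop := out = makeDick_alt word
instance (word : String) (out : String) : Decidable (Spec_makeDick word out) := by unfold Spec_makeDick; infer_instance

-- ===== CLAIM (what is proved, stated in full; the proofs are below) =====
def Claim_equal_makeDick : Prop := ∀ (word : String), Dom_makeDick word → Spec_makeDick word (makeDick word)

-- ===== LEMMAS AND PROOFS =====

-- the first-occurrence index dictionary of a char list, as one literal Dict
def pvDD (p : List Char) : PySem.Dict Char String :=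
  PySem.Dict.mk ((PySem.List.enumerate (PySem.List.dedup p)).map (fun q => (q.2, PySem.Int.toStr q.1)))

theorem pvDD_items (p : List Char) :
    (pvDD p).items = (PySem.List.enumerate (PySem.List.dedup p)).map (fun q => (q.2, PySem.Int.toStr q.1)) := rfl

theorem pvDD_keys (p : List Char) : (pvDD p).keys = PySem.List.dedup p := by
  show ((PySem.List.enumerate (PySem.List.dedup p)).map (fun q => (q.2, PySem.Int.toStr q.1))).map (·.1)
      = PySem.List.dedup p
  rw [List.map_map]
  exact PySem.List.map_snd_enumerate _ _

theorem pvDD_keys_nodup (p : List Char) : (pvDD p).keys.Nodup := by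
  rw [pvDD_keys]; exact PySem.List.nodup_dedup p

theorem pvDedup_append_singleton (p : List Char) (c : Char) :
    PySem.List.dedup (p ++ [c])
      = if c ∈ PySem.List.dedup p then PySem.List.dedup p else PySem.List.dedup p ++ [c] := by
  simp only [PySem.List.dedup_eq_ofList, PySem.Set.ofList_eq_foldl, List.foldl_append, List.foldl]
  show PySem.Set.add _ c = _
  rw [PySem.Set.add]
  simp [PySem.Set.contains]

theorem pvDedup_append (p cs : List Char) :
    ∃ t, PySem.List.dedup (p ++ cs) = PySem.List.dedup p ++ t := by
  induction cs generalizing p with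
  | nil => exact ⟨[], by simp⟩
  | cons c cs ih =>
    have h : p ++ c :: cs = (p ++ [c]) ++ cs := by simp
    rw [h]
    obtain ⟨t, ht⟩ := ih (p ++ [c])
    rw [ht]
    by_cases hc : c ∈ PySem.List.dedup p
    · rw [pvDedup_append_singleton, if_pos hc]
      exact ⟨t, rfl⟩
    · rw [pvDedup_append_singleton, if_neg hc]
      exact ⟨c :: t, by simp⟩

theorem pvIdx_stable (p cs : List Char) (ch : Char) (h : ch ∈ PySem.List.dedup p) :
    (PySem.List.dedup (p ++ cs)).idxOf ch = (PySem.List.dedup p).idxOf ch := by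
  obtain ⟨t, ht⟩ := pvDedup_append p cs
  rw [ht, List.idxOf_append_of_mem h]

theorem pvVal_DD (p : List Char) (ch : Char) (h : ch ∈ PySem.List.dedup p) :
    (pvDD p).getD ch "" = PySem.Int.toStr (((PySem.List.dedup p).idxOf ch : Nat) : Int) := by
  have hk : (ch, PySem.Int.toStr (((PySem.List.dedup p).idxOf ch : Nat) : Int)) ∈ (pvDD p).items := by
    rw [pvDD_items]
    apply List.mem_map.mpr
    refine ⟨((((PySem.List.dedup p).idxOf ch : Nat) : Int), ch), ?_, rfl⟩
    rw [PySem.List.mem_enumerate_iff]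
    exact ⟨(PySem.List.dedup p).idxOf ch, List.idxOf_lt_length_of_mem h,
      by simp [List.getElem_idxOf]⟩
  exact PySem.Dict.getD_of_mem_items (pvDD p) hk (pvDD_keys_nodup p) ""

theorem pvIdxOf_append_self (l : List Char) (c : Char) (h : c ∉ l) : (l ++ [c]).idxOf c = l.length := by
  induction l with
  | nil => simp
  | cons a l ih =>
    simp only [List.mem_cons, not_or] at h
    have hne : ¬ (a = c) := fun hac => h.1 hac.symm
    simp [hne, ih h.2]

theorem pvLoopA (cs p : List Char) (acc : List String) :
    List.foldl makeDickStep (pvDD p, acc, ((PySem.List.dedup p).length : Int)) cs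
      = (pvDD (p ++ cs),
         acc ++ cs.map (fun ch => PySem.Int.toStr (((PySem.List.dedup (p ++ cs)).idxOf ch : Nat) : Int)),
         ((PySem.List.dedup (p ++ cs)).length : Int)) := by
  induction cs generalizing p acc with
  | nil => simp
  | cons c cs ih =>
    rw [List.foldl_cons]
    have hcontains : (pvDD p).contains c = decide (c ∈ PySem.List.dedup p) := by
      rw [PySem.Dict.contains_eq_decide_mem_keys, pvDD_keys]
    have hassoc : (p ++ [c]) ++ cs = p ++ c :: cs := by simp
    by_cases hc : c ∈ PySem.List.dedup p
    · have hct : (pvDD p).contains c = true := by rw [hcontains]; exact decide_eq_true hc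
      have hded : PySem.List.dedup (p ++ [c]) = PySem.List.dedup p := by
        rw [pvDedup_append_singleton, if_pos hc]
      have hDD : pvDD (p ++ [c]) = pvDD p := by unfold pvDD; rw [hded]
      have hstep : makeDickStep (pvDD p, acc, ((PySem.List.dedup p).length : Int)) c
          = (pvDD (p ++ [c]), acc ++ [(pvDD p).getD c ""],
             ((PySem.List.dedup (p ++ [c])).length : Int)) := by
        rw [hDD, hded]
        simp [makeDickStep, hct]
      rw [hstep, ih, hassoc]
      have hv : (pvDD p).getD c ""
          = PySem.Int.toStr (((PySem.List.dedup (p ++ c :: cs)).idxOf c : Nat) : Int) := by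
        rw [pvVal_DD p c hc, pvIdx_stable p (c :: cs) c hc]
      rw [hv]
      simp
    · have hcf : (pvDD p).contains c = false := by rw [hcontains]; exact decide_eq_false hc
      have hded : PySem.List.dedup (p ++ [c]) = PySem.List.dedup p ++ [c] := by
        rw [pvDedup_append_singleton, if_neg hc]
      have hDD : pvDD (p ++ [c])
          = (pvDD p).insert c (PySem.Int.toStr ((PySem.List.dedup p).length : Int)) := by
        apply PySem.Dict.ext
        rw [PySem.Dict.items_insert_of_not_contains (pvDD p)
              (PySem.Int.toStr ((PySem.List.dedup p).length : Int)) hcf]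
        rw [pvDD_items, pvDD_items, hded, PySem.List.enumerate_append,
            PySem.List.enumerate_cons, PySem.List.enumerate_nil]
        simp
      have hstep : makeDickStep (pvDD p, acc, ((PySem.List.dedup p).length : Int)) c
          = (pvDD (p ++ [c]), acc ++ [PySem.Int.toStr ((PySem.List.dedup p).length : Int)],
             ((PySem.List.dedup (p ++ [c])).length : Int)) := by
        rw [hDD, hded]
        simp [makeDickStep, hcf]
      rw [hstep, ih, hassoc]
      have hmem : c ∈ PySem.List.dedup (p ++ [c]) := by rw [hded]; simp
      have hv : PySem.Int.toStr ((PySem.List.dedup p).length : Int)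
          = PySem.Int.toStr (((PySem.List.dedup (p ++ c :: cs)).idxOf c : Nat) : Int) := by
        rw [← hassoc, pvIdx_stable (p ++ [c]) cs c hmem, hded,
            pvIdxOf_append_self _ _ hc]
      rw [hv]
      simp

theorem pvA_canon (L : List Char) :
    List.foldl makeDickStep (PySem.Dict.empty, [], 0) L
      = (pvDD L, L.map (fun ch => PySem.Int.toStr (((PySem.List.dedup L).idxOf ch : Nat) : Int)),
         ((PySem.List.dedup L).length : Int)) := by
  have h := pvLoopA L [] []
  simpa using h

-- B's per-character closed form: number of distinct chars before the first occurrence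
-- equals the first-occurrence index in the ordered dedup
theorem pvB_char (L : List Char) (ch : Char) (h : ch ∈ L) :
    (PySem.Set.ofList (L.take ((PySem.List.index? L ch).getD 0))).length
      = (PySem.List.dedup L).idxOf ch := by
  obtain ⟨k, hk⟩ := Option.isSome_iff_exists.mp ((PySem.List.index?_isSome_iff L ch).mpr h)
  obtain ⟨pre, suf, hL, hlen, hnot⟩ := (PySem.List.index?_eq_some_iff L ch k).mp hk
  have hnotd : ch ∉ PySem.List.dedup pre := fun hm => hnot ((PySem.List.mem_dedup _ _).mp hm)
  have htake : L.take k = pre := by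
    rw [hL, ← hlen, List.take_left]
  have hded1 : PySem.List.dedup (pre ++ [ch]) = PySem.List.dedup pre ++ [ch] := by
    rw [pvDedup_append_singleton, if_neg hnotd]
  have hmem : ch ∈ PySem.List.dedup (pre ++ [ch]) := by rw [hded1]; simp
  have hL' : L = (pre ++ [ch]) ++ suf := by rw [hL]; simp
  rw [hk, Option.getD_some, htake, hL', pvIdx_stable _ _ _ hmem, hded1,
      pvIdxOf_append_self _ _ hnotd, ← PySem.List.dedup_eq_ofList]

-- ===== VERDICT (by name: the statement is the Claim_ definition above) =====
theorem makeDick_spec : Claim_equal_makeDick := by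
  intro word _
  show makeDick word = makeDick_alt word
  simp only [makeDick, makeDick_alt]
  rw [pvA_canon]
  apply congrArg
  apply List.map_congr_left
  intro ch hch
  rw [pvB_char _ _ hch]
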